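-- pv_equiv track=rewrite | github.com/WONDO-K/-WONDO-K-Argorithm-Study | 프로그래머스/1/72410. 신규 아이디 추천/신규 아이디 추천.py | solution
-- ===== SOURCE A (Python) =====
-- def solution(new_id):
--     # 1단계 모든 대문자 -> 소문자로
--     after_id = new_id.lower()
--
--     # 2단계: 허용된 문자만 남기기
--     temp = ''
--     for ch in after_id:
--         if ch.isalnum() or ch in ['-', '_', '.']:
--             temp += ch
--     after_id = temp
--
--     while '..' in after_id: # ...이든 ....이든 .....이든 그 안에 ..이 포함되어 있기 때문에 ..이 없을 때까지 .으로 치환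
--         after_id = after_id.replace('..','.')
--
--
--     # 4단계
--     after_id = after_id.strip('.')
--
--     # 5단계
--     if after_id == '':
--         after_id = 'a'
--
--     # 6단계
--     if len(after_id) >= 16:
--         after_id = after_id[:15]
--         if after_id[-1] == '.':
--             after_id = after_id[:-1]
--
--     # 7단계
--     while len(after_id)<3:
--         after_id += after_id[-1]
--     return after_id
-- ===== SOURCE B (Python) =====
-- def solution(new_id):
--     # single pass: lowercase, keep allowed chars, and collapse dot-runs on the fly
--     out = []
--     for ch in new_id.lower():
--         if ch.isalnum() or ch in '-_.':
--             if not (ch == '.' and out and out[-1] == '.'):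
--                 out.append(ch)
--     s = ''.join(out).strip('.')
--     if not s:
--         s = 'a'
--     elif len(s) > 15:
--         s = s[:15].rstrip('.')
--     if len(s) < 3:
--         s = s + s[-1] * (3 - len(s))
--     return s
-- ===== Notes on version B (the rewrite author's own statement) =====
-- stated objective: alternative
-- what changed: B fuses the character filter and the dot-run collapse into one left-to-right pass (replacing A's repeated replace-and-rescan while loop), uses a right-strip of trailing dots instead of A's single-dot check after truncation, and pads with arithmetic repetition instead of a while loop.
import Mathlib
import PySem

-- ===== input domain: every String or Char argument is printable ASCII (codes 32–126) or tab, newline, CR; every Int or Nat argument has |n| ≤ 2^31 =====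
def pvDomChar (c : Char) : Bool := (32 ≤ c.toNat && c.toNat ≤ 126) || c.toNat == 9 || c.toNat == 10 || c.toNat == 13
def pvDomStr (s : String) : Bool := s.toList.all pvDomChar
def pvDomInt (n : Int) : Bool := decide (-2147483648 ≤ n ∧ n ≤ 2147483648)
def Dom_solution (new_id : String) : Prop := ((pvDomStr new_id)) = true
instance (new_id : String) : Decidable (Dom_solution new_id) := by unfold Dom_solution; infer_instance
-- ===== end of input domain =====

-- B fuses A's filter loop and its while-replace dot-run collapse into one left-to-right pass,
-- uses a trailing-dot right-strip after truncation and arithmetic repetition for the padding.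


-- ===== PORT A =====
-- pvRep1 is one left-to-right pass of s.replace('..','.') ; the lemmas below it justify
-- termination of the while-loop port pvDotLoop and are cited in its decreasing_by.
def pvRep1 : List Char → List Char
  | [] => []
  | [c] => [c]
  | c :: d :: t => if c = '.' ∧ d = '.' then '.' :: pvRep1 t else c :: pvRep1 (d :: t)

theorem pvGo_spec (fuel : Nat) : ∀ (l acc : List Char), l.length ≤ fuel →
    PySem.Chars.replace.go ['.','.'] ['.'] fuel l acc = acc.reverse ++ pvRep1 l := by
  induction fuel with
  | zero =>
    intro l acc h
    have : l = [] := List.eq_nil_of_length_eq_zero (Nat.le_zero.mp h)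
    subst this; simp [PySem.Chars.replace.go, pvRep1]
  | succ f ih =>
    intro l acc h
    match l with
    | [] => simp [PySem.Chars.replace.go, pvRep1]
    | [c] =>
      simp only [PySem.Chars.replace.go]
      have hpre : (['.','.'].isPrefixOf [c]) = false := by simp [List.isPrefixOf]
      rw [hpre]
      simp only [Bool.false_eq_true, if_false]
      rw [ih [] (c :: acc) (by simp)]
      simp [pvRep1]
    | c :: d :: t =>
      simp only [PySem.Chars.replace.go]
      by_cases hcd : c = '.' ∧ d = '.'
      · obtain ⟨hc, hd⟩ := hcd; subst hc; subst hd
        have hpre : (['.','.'].isPrefixOf ('.' :: '.' :: t)) = true := by simp [List.isPrefixOf]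
        rw [hpre]
        simp only [if_true]
        have hd2 : List.drop (['.','.'] : List Char).length ('.' :: '.' :: t) = t := rfl
        have ha2 : (['.'] : List Char).reverse ++ acc = '.' :: acc := rfl
        rw [hd2, ha2, ih t ('.' :: acc) (by simp at h ⊢; omega)]
        simp [pvRep1]
      · have hpre : (['.','.'].isPrefixOf (c :: d :: t)) = false := by
          simp [List.isPrefixOf]; intro hc hd; exact hcd ⟨hc.symm, hd.symm⟩
        rw [hpre]
        simp only [Bool.false_eq_true, if_false]
        rw [ih (d :: t) (c :: acc) (by simp at h ⊢; omega)]
        simp [pvRep1, hcd]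

theorem pvReplace_eq_rep1 (l : List Char) :
    PySem.Chars.replace l ['.','.'] ['.'] = pvRep1 l := by
  rw [PySem.Chars.replace]
  simp only [List.isEmpty_cons, Bool.false_eq_true, if_false]
  rw [pvGo_spec l.length l [] le_rfl]; simp

theorem pvRep1_len_le (l : List Char) : (pvRep1 l).length ≤ l.length := by
  induction l using pvRep1.induct with
  | case1 => simp [pvRep1]
  | case2 c => simp [pvRep1]
  | case3 c d t h ih => simp [pvRep1, h]; omega
  | case4 c d t h ih =>
    have ih' : (pvRep1 (d :: t)).length ≤ t.length + 1 := by simpa using ih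
    simp [pvRep1, h]; omega

theorem pvRep1_len_lt (l : List Char) (h : ['.','.'] <:+: l) :
    (pvRep1 l).length < l.length := by
  induction l using pvRep1.induct with
  | case1 => simp at h
  | case2 c =>
    exfalso
    obtain ⟨s, t, hst⟩ := h
    have := congrArg List.length hst; simp at this; omega
  | case3 c d t hcd ih =>
    obtain ⟨hc, hd⟩ := hcd; subst hc; subst hd
    have := pvRep1_len_le t
    simp [pvRep1]; omega
  | case4 c d t hcd ih =>
    have h' : ['.','.'] <:+: d :: t := by
      rcases List.infix_cons_iff.mp h with hp | hs
      · exfalso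
        rcases hp with ⟨r, hr⟩
        cases hr
        exact hcd ⟨rfl, rfl⟩
      · exact hs
    have := ih h'
    simp [pvRep1, hcd]
    simpa using this

theorem pvReplace_len_lt (l : List Char) (h : PySem.Chars.isIn ['.','.'] l = true) :
    (PySem.Chars.replace l ['.','.'] ['.']).length < l.length := by
  rw [pvReplace_eq_rep1]
  exact pvRep1_len_lt l ((PySem.Chars.isIn_iff_infix _ _).mp h)

def pvDotLoop (cs : List Char) : List Char :=
  if h : PySem.Chars.isIn ['.','.'] cs = true then
    pvDotLoop (PySem.Chars.replace cs ['.','.'] ['.'])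
  else cs
termination_by cs.length
decreasing_by exact pvReplace_len_lt cs h

def pvPadLoop (cs : List Char) : List Char :=
  if cs.length < 3 then pvPadLoop (cs ++ [(PySem.List.pyGet? cs (-1)).getD ' ']) else cs
termination_by 3 - cs.length
decreasing_by simp; omega

def solution (new_id : String) : String :=
  let a1 := PySem.Chars.lower new_id.toList
  let temp := a1.foldl
    (fun acc ch => if PySem.Chars.isalnum ch || ch ∈ ['-', '_', '.'] then acc ++ [ch] else acc) []
  let a2 := pvDotLoop temp
  let a3 := PySem.Chars.stripChars a2 ['.']
  let a4 := if a3 = [] then ['a'] else a3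
  let a5 := if 16 ≤ a4.length then
      let t := PySem.List.slice a4 none (some 15)
      if PySem.List.pyGet? t (-1) = some '.' then PySem.List.slice t none (some (-1)) else t
    else a4
  String.mk (pvPadLoop a5)

-- ===== PORT B =====
-- hand port of s.rstrip('.') (single strip char): drop trailing '.'s; exact for this call
def pvRstripDots (cs : List Char) : List Char := (cs.reverse.dropWhile (· == '.')).reverse

def solution_alt (new_id : String) : String :=
  let out := (PySem.Chars.lower new_id.toList).foldl
    (fun acc ch =>
      if PySem.Chars.isalnum ch || ch ∈ ['-', '_', '.'] then
        if ch == '.' && !acc.isEmpty && acc.getLast? == some '.' then acc else acc ++ [ch]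
      else acc) []
  let s1 := PySem.Chars.stripChars out ['.']
  let s2 := if s1 = [] then ['a']
            else if 15 < s1.length then pvRstripDots (PySem.List.slice s1 none (some 15))
            else s1
  let s3 := if s2.length < 3 then
      s2 ++ PySem.List.pyRepeat [(PySem.List.pyGet? s2 (-1)).getD ' '] (3 - (s2.length : Int))
    else s2
  String.mk s3

-- ===== PRECONDITION & SPEC =====
def Spec_solution (new_id : String) (out : String) : Prop := out = solution_alt new_id
instance (new_id : String) (out : String) : Decidable (Spec_solution new_id out) := by unfold Spec_solution; infer_instance

-- ===== CLAIM (what is proved, stated in full; the proofs are below) =====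
def Claim_equal_solution : Prop := ∀ (new_id : String), Dom_solution new_id → Spec_solution new_id (solution new_id)

-- ===== LEMMAS AND PROOFS =====

-- canonical dot-run collapse, remembering the previously emitted character
def pvCollapse : Option Char → List Char → List Char
  | _, [] => []
  | p, c :: t => if c = '.' ∧ p = some '.' then pvCollapse p t else c :: pvCollapse (some c) t

theorem pvCollapse_cons (p : Option Char) (c : Char) (t : List Char) :
    pvCollapse p (c :: t) =
      if c = '.' ∧ p = some '.' then pvCollapse p t else c :: pvCollapse (some c) t := rfl

theorem pvCollapse_rep1 (l : List Char) : ∀ p, pvCollapse p (pvRep1 l) = pvCollapse p l := by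
  induction l using pvRep1.induct with
  | case1 => intro p; simp [pvRep1]
  | case2 c => intro p; simp [pvRep1]
  | case3 c d t hcd ih =>
    obtain ⟨hc, hd⟩ := hcd; subst hc; subst hd
    intro p
    by_cases hp : p = some '.'
    · simp [pvRep1, pvCollapse, hp, ih]
    · simp [pvRep1, pvCollapse, hp, ih]
  | case4 c d t hcd ih =>
    intro p
    by_cases hcp : c = '.' ∧ p = some '.'
    · have hd : d ≠ '.' := fun h => hcd ⟨hcp.1, h⟩
      simp [pvRep1, pvCollapse, hcp.1, hcp.2, hd, ih]
    · simp [pvRep1, pvCollapse, hcd, hcp, ih]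

theorem pvCollapse_fix (l : List Char) : ∀ p, ¬ (['.','.'] <:+: l) →
    (p = some '.' → l.head? ≠ some '.') → pvCollapse p l = l := by
  induction l with
  | nil => intro p _ _; simp [pvCollapse]
  | cons c t ih =>
    intro p hinf hhd
    have hni : ¬ (['.','.'] <:+: t) := fun h => hinf (List.infix_cons_iff.mpr (Or.inr h))
    have hcp : ¬ (c = '.' ∧ p = some '.') := by
      rintro ⟨hc, hp⟩; exact (hhd hp) (by simp [hc])
    simp only [pvCollapse, hcp, if_false]
    rw [ih (some c) hni]
    intro hc hth
    apply hinf
    apply List.infix_cons_iff.mpr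
    left
    cases t with
    | nil => simp at hth
    | cons d t' =>
      simp at hth
      refine ⟨t', ?_⟩
      simp at hc
      simp [hc, hth]

theorem pvDotLoop_eq_collapse (cs : List Char) : pvDotLoop cs = pvCollapse none cs := by
  induction hn : cs.length using Nat.strong_induction_on generalizing cs with
  | _ n ih =>
    subst hn
    by_cases h : PySem.Chars.isIn ['.','.'] cs = true
    · rw [pvDotLoop, dif_pos h, ih _ (pvReplace_len_lt cs h) _ rfl, pvReplace_eq_rep1,
        pvCollapse_rep1]
    · rw [pvDotLoop, dif_neg h]
      have hinf : ¬ (['.','.'] <:+: cs) := fun hc =>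
        h ((PySem.Chars.isIn_iff_infix _ _).mpr hc)
      exact (pvCollapse_fix cs none hinf (by simp)).symm

-- B's fused loop computes the collapse of the filtered characters
theorem pvFold_collapse (p : Char → Bool) (L : List Char) : ∀ acc : List Char,
    L.foldl (fun acc ch =>
      if p ch then
        if ch == '.' && !acc.isEmpty && acc.getLast? == some '.' then acc else acc ++ [ch]
      else acc) acc = acc ++ pvCollapse acc.getLast? (L.filter p) := by
  induction L with
  | nil => intro acc; simp [pvCollapse]
  | cons c t ih =>
    intro acc
    by_cases hp : p c
    · simp only [List.foldl_cons, List.filter_cons, hp, if_true]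
      by_cases hcp : c = '.' ∧ acc.getLast? = some '.'
      · have hb : (c == '.' && !acc.isEmpty && acc.getLast? == some '.') = true := by
          have : acc ≠ [] := by
            intro h; rw [h] at hcp; simp at hcp
          simp [hcp.1, hcp.2, this]
        rw [hb]
        simp only [if_true]
        rw [ih acc]
        simp [pvCollapse, hcp.1, hcp.2]
      · have hb : (c == '.' && !acc.isEmpty && acc.getLast? == some '.') = false := by
          by_cases hc : c = '.'
          · have hlast : ¬ (acc.getLast? = some '.') := fun h => hcp ⟨hc, h⟩
            simp [hc, hlast]
          · simp [hc]
        rw [hb]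
        simp only [Bool.false_eq_true, if_false]
        rw [ih (acc ++ [c])]
        simp [pvCollapse, hcp]
    · simp only [List.foldl_cons, List.filter_cons, hp, Bool.false_eq_true, if_false]
      rw [ih acc]

-- collapse output: no '..' inside, and it never starts with '.' right after a '.'
theorem pvCollapse_clean (l : List Char) : ∀ p,
    ((p = some '.' → (pvCollapse p l).head? ≠ some '.') ∧ ¬ (['.','.'] <:+: pvCollapse p l)) := by
  induction l with
  | nil => intro p; simp [pvCollapse]
  | cons c t ih =>
    intro p
    by_cases hcp : c = '.' ∧ p = some '.'
    · rw [pvCollapse_cons, if_pos hcp]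
      exact ih p
    · rw [pvCollapse_cons, if_neg hcp]
      constructor
      · intro hp hc
        simp at hc
        exact hcp ⟨hc, hp⟩
      · intro hinf
        rcases List.infix_cons_iff.mp hinf with hpre | hsuf
        · rcases hpre with ⟨r, hr⟩
          have hr' : ('.' : Char) :: '.' :: r = c :: pvCollapse (some c) t := by simpa using hr
          injection hr' with hc h2
          have hhead : (pvCollapse (some c) t).head? = some '.' := by
            rw [← h2]; rfl
          rw [← hc] at hhead
          exact (ih (some '.')).1 rfl hhead
        · exact (ih (some c)).2 hsuf

theorem pvStripChars_prefix (s chars : List Char) :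
    PySem.Chars.stripChars s chars <+: List.dropWhile (fun c => chars.contains c) s := by
  rw [PySem.Chars.stripChars]
  have h := (List.dropWhile_suffix (l := (List.dropWhile (fun c => chars.contains c) s).reverse)
    (fun c => chars.contains c)).reverse
  simpa using h

theorem pvStripChars_infix (s chars : List Char) : PySem.Chars.stripChars s chars <:+: s := by
  exact List.IsInfix.trans (pvStripChars_prefix s chars).isInfix
    (List.dropWhile_suffix (fun c => chars.contains c)).isInfix

theorem pvGet_neg_one (l : List Char) : PySem.List.pyGet? l (-1) = l.getLast? := by
  cases l with
  | nil => simp [PySem.List.pyGet?, PySem.List.pyIdx?]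
  | cons c t =>
    simp [PySem.List.pyGet?, PySem.List.pyIdx?]
    rw [List.getLast?_eq_getElem?]
    norm_num

theorem pvRstrip_spec (t : List Char) (h : ¬ (['.','.'] <:+: t)) :
    pvRstripDots t = if PySem.List.pyGet? t (-1) = some '.' then t.dropLast else t := by
  rw [pvGet_neg_one, pvRstripDots]
  cases hr : t.reverse with
  | nil =>
    have : t = [] := by simpa using congrArg List.reverse hr
    subst this; simp
  | cons c r =>
    have ht : t = r.reverse ++ [c] := by
      have := congrArg List.reverse hr; simpa using this
    have hlast : t.getLast? = some c := by rw [ht]; simp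
    rw [hlast]
    by_cases hc : c = '.'
    · subst hc
      rw [if_pos rfl]
      cases r with
      | nil => simp [ht]
      | cons d r' =>
        have hd : ¬ (d = '.') := by
          intro hd; subst hd
          apply h
          rw [ht]
          exact ⟨r'.reverse, [], by simp⟩
        simp only [List.dropWhile_cons]
        simp [hd, ht]
    · simp only [List.dropWhile_cons]
      have : (c == '.') = false := by simp [hc]
      rw [this]
      simp only [Bool.false_eq_true, if_false]
      rw [← hr]
      simp [hc]

theorem pvPadLoop_spec (s : List Char) :
    pvPadLoop s = s ++ List.replicate (3 - s.length) (s.getLast?.getD ' ') := by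
  match s with
  | [] =>
    rw [pvPadLoop, if_pos (by simp), pvPadLoop, if_pos (by simp), pvPadLoop, if_pos (by simp),
      pvPadLoop, if_neg (by simp)]
    simp [pvGet_neg_one]
  | [a] =>
    rw [pvPadLoop, if_pos (by simp), pvPadLoop, if_pos (by simp), pvPadLoop, if_neg (by simp)]
    simp [pvGet_neg_one]
  | [a, b] =>
    rw [pvPadLoop, if_pos (by simp), pvPadLoop, if_neg (by simp)]
    simp [pvGet_neg_one]
  | a :: b :: c :: t =>
    rw [pvPadLoop, if_neg (by simp)]
    simp

theorem solution_eq (new_id : String) : solution new_id = solution_alt new_id := by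
  rw [solution, solution_alt]
  simp only
  set L := PySem.Chars.lower new_id.toList with hL
  set p := fun ch => PySem.Chars.isalnum ch || ch ∈ ['-', '_', '.'] with hp
  have htemp : L.foldl
      (fun acc ch => if PySem.Chars.isalnum ch || ch ∈ ['-', '_', '.'] then acc ++ [ch] else acc)
      [] = L.filter p := by
    rw [PySem.List.foldl_append_if_eq_filter p L []]
    simp
  have hout : L.foldl
      (fun acc ch =>
        if PySem.Chars.isalnum ch || ch ∈ ['-', '_', '.'] then
          if ch == '.' && !acc.isEmpty && acc.getLast? == some '.' then acc else acc ++ [ch]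
        else acc) [] = pvCollapse none (L.filter p) := by
    rw [pvFold_collapse p L []]
    simp
  rw [htemp, hout, pvDotLoop_eq_collapse]
  set C := pvCollapse none (L.filter p) with hC
  set s1 := PySem.Chars.stripChars C ['.'] with hs1
  have hs1inf : ¬ (['.','.'] <:+: s1) := by
    intro hin
    exact (pvCollapse_clean (L.filter p) none).2 (List.IsInfix.trans hin (pvStripChars_infix C ['.']))
  by_cases hnil : s1 = []
  · rw [if_pos hnil, hnil]
    rw [if_neg (by simp)]
    rw [pvPadLoop_spec]
    decide
  · rw [if_neg hnil, if_neg hnil]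
    by_cases hlen : 16 ≤ s1.length
    · have h15 : 15 < s1.length := hlen
      rw [if_pos hlen, if_pos h15]
      have htake : PySem.List.slice s1 none (some 15) = List.take 15 s1 := by
        rw [PySem.List.slice_to s1 (by norm_num)]
        rfl
      rw [htake]
      have htinf : ¬ (['.','.'] <:+: List.take 15 s1) := fun hin =>
        hs1inf (List.IsInfix.trans hin (List.take_prefix 15 s1).isInfix)
      have hlen15 : (List.take 15 s1).length = 15 := by simp; omega
      rw [pvRstrip_spec _ htinf]
      have hdl : PySem.List.slice (List.take 15 s1) none (some (-1)) =
          (List.take 15 s1).dropLast := PySem.List.slice_to_neg_one _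
      by_cases hdot : PySem.List.pyGet? (List.take 15 s1) (-1) = some '.'
      · rw [if_pos hdot, if_pos hdot, hdl]
        have hlenD : (List.take 15 s1).dropLast.length = 14 := by simp [hlen15]
        have h3 : ¬ ((List.take 15 s1).dropLast.length < 3) := by omega
        rw [pvPadLoop_spec, if_neg h3]
        simp [hlenD]
      · rw [if_neg hdot, if_neg hdot]
        have h3 : ¬ ((List.take 15 s1).length < 3) := by omega
        rw [pvPadLoop_spec, if_neg h3]
        simp [hlen15]
    · have h15 : ¬ (15 < s1.length) := by omega
      rw [if_neg hlen, if_neg h15]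
      rw [pvPadLoop_spec]
      by_cases h3 : s1.length < 3
      · rw [if_pos h3]
        rw [PySem.List.pyRepeat_singleton, pvGet_neg_one]
        have : ((3 : Int) - (s1.length : Int)).toNat = 3 - s1.length := by omega
        rw [this]
      · rw [if_neg h3]
        have : 3 - s1.length = 0 := by omega
        simp [this]

-- ===== VERDICT (by name: the statement is the Claim_ definition above) =====
theorem solution_spec : Claim_equal_solution := by
  intro new_id _
  unfold Spec_solution
  exact solution_eq new_id
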